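-- pv_equiv track=rewrite | github.com/hz157/weibo-spider | source/Clean.py | cleanSpanLabel
-- ===== SOURCE A (Python) =====
-- def cleanSpanLabel(data):
--     try:
--         start = data.index('<span')
--         end = data[start + 1:len(data)].index('</span>') + start
--         remove = data[start:end + 8]
--         data = data.replace(remove, '')
--         return cleanSpanLabel(data)
--     except:
--         return data
-- ===== SOURCE B (Python) =====
-- def cleanSpanLabel(data):
--     while True:
--         _pre, tag, rest = data.partition('<span')
--         if not tag:
--             return data
--         mid, tag2, _post = rest.partition('</span>')
--         if not tag2:
--             return data
--         data = data.replace(tag + mid + tag2, '')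
-- ===== Notes on version B (the rewrite author's own statement) =====
-- stated objective: alternative
-- what changed: Replaced A's try/except tail recursion over index arithmetic (index, off-by-one slice bounds, data[start:end+8]) with an iterative while-loop that decomposes the string by str.partition twice and reassembles the removed tag block by concatenating the three partition pieces, with no index computations.
import Mathlib
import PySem

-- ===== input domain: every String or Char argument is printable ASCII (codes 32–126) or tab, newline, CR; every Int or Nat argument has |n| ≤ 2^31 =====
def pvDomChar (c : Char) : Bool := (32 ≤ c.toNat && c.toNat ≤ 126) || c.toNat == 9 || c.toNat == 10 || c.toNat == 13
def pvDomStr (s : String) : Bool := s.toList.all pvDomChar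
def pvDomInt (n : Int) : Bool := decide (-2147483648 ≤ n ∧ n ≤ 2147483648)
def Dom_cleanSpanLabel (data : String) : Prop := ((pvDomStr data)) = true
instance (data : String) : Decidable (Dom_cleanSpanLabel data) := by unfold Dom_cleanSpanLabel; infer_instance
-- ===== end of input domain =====

-- B replaces A's index-arithmetic try/except recursion by an iterative str.partition
-- decomposition (objective: alternative); return values agree everywhere (note: the Python A
-- can hit RecursionError, swallowed by its bare except, only at recursion depths far beyond
-- tested input sizes).

-- ===== PORT A =====
-- fuel = data.length + 1 bounds the number of passes (each pass removes a nonempty substring);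
-- the try/except around .index is ported as the find = -1 checks, in source order.
def cleanSpanLabelGoA : Nat → String → String
  | 0, data => data
  | fuel + 1, data =>
    let start := PySem.Str.find data "<span"
    if start = -1 then data
    else
      let rel := PySem.Str.find (PySem.Str.slice data (some (start + 1)) (some (PySem.Str.len data))) "</span>"
      if rel = -1 then data
      else
        let e := rel + start
        let remove := PySem.Str.slice data (some start) (some (e + 8))
        cleanSpanLabelGoA fuel (PySem.Str.replace data remove "")

def cleanSpanLabel (data : String) : String := cleanSpanLabelGoA (data.length + 1) data

-- ===== PORT B =====
-- hand port of str.partition (PySem has none): first occurrence of pat splits s into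
-- (before, pat, after); if absent, (s, '', ''). Exact for nonempty pat (B only passes literals).
def pyPartition : List Char → List Char → List Char × List Char × List Char
  | s, pat =>
    if pat.isPrefixOf s then ([], pat, s.drop pat.length)
    else
      match s with
      | [] => ([], [], [])
      | c :: t =>
        let (p, m, r) := pyPartition t pat
        (c :: p, m, r)

-- the while-True loop as fuel recursion over the string's characters.
def cleanSpanLabelGoB : Nat → List Char → List Char
  | 0, s => s
  | fuel + 1, s =>
    let (_pre, tag, rest) := pyPartition s "<span".toList
    if tag.isEmpty then s
    else
      let (mid, tag2, _post) := pyPartition rest "</span>".toList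
      if tag2.isEmpty then s
      else cleanSpanLabelGoB fuel (PySem.Chars.replace s (tag ++ mid ++ tag2) [])

def cleanSpanLabel_alt (data : String) : String :=
  String.ofList (cleanSpanLabelGoB (data.length + 1) data.toList)

-- ===== PRECONDITION & SPEC =====
def Spec_cleanSpanLabel (data : String) (out : String) : Prop := out = cleanSpanLabel_alt data
instance (data : String) (out : String) : Decidable (Spec_cleanSpanLabel data out) := by unfold Spec_cleanSpanLabel; infer_instance

-- ===== CLAIM (what is proved, stated in full; the proofs are below) =====
def Claim_equal_cleanSpanLabel : Prop := ∀ (data : String), Dom_cleanSpanLabel data → Spec_cleanSpanLabel data (cleanSpanLabel data)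

-- ===== LEMMAS AND PROOFS =====

theorem infix_cons_of_infix {p l : List Char} (a : Char) (h : p <:+: l) : p <:+: a :: l := by
  obtain ⟨s, t, h⟩ := h; exact ⟨a :: s, t, by simp [← h]⟩

theorem infix_of_prefix_drop {p u : List Char} {i : Nat} (h : p <+: u.drop i) : p <:+: u := by
  obtain ⟨w, hw⟩ := h
  exact ⟨u.take i, w, by rw [List.append_assoc, hw, List.take_append_drop]⟩

-- find on a cons cell when pat does not match at position 0
theorem find_cons {c : Char} {t pat : List Char} (h : ¬ pat <+: c :: t) :
    PySem.Chars.find (c :: t) pat =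
      if PySem.Chars.find t pat = -1 then -1 else PySem.Chars.find t pat + 1 := by
  by_cases h1 : PySem.Chars.find t pat = -1
  · rw [if_pos h1, PySem.Chars.find_eq_neg_one_iff] at *
    intro hin
    rcases List.infix_cons_iff.mp hin with hp | hi
    · exact h hp
    · exact h1 hi
  · rw [if_neg h1]
    have h0 : 0 ≤ PySem.Chars.find t pat := by
      have := PySem.Chars.neg_one_le_find t pat; omega
    obtain ⟨hpre, hmin⟩ := PySem.Chars.find_spec h0
    have hin : pat <:+: (c :: t) :=
      infix_cons_of_infix c (infix_of_prefix_drop hpre)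
    have h2 : 0 ≤ PySem.Chars.find (c :: t) pat := (PySem.Chars.find_nonneg_iff _ _).mpr hin
    obtain ⟨hpre2, hmin2⟩ := PySem.Chars.find_spec h2
    set f := (PySem.Chars.find (c :: t) pat).toNat with hf
    set i := (PySem.Chars.find t pat).toNat with hi
    have hfne : f ≠ 0 := by
      intro h0'
      rw [h0'] at hpre2
      exact h (by simpa using hpre2)
    -- pat <+: (c :: t).drop f = t.drop (f - 1), so i ≤ f - 1 by t's minimality
    have hle1 : i ≤ f - 1 := by
      by_contra hlt
      push Not at hlt
      have : ¬ pat <+: t.drop (f - 1) := hmin (f - 1) (by omega)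
      have hdrop : (c :: t).drop f = t.drop (f - 1) := by
        obtain ⟨f', hf'⟩ : ∃ f', f = f' + 1 := ⟨f - 1, by omega⟩
        rw [hf']; simp
      rw [hdrop] at hpre2
      exact this hpre2
    -- pat <+: (c :: t).drop (i + 1), so f ≤ i + 1 by (c :: t)'s minimality
    have hle2 : f ≤ i + 1 := by
      by_contra hlt
      push Not at hlt
      exact hmin2 (i + 1) (by omega) (by simpa using hpre)
    omega

-- pyPartition computes exactly what find characterises
theorem pyPartition_not_found {s pat : List Char} (h : PySem.Chars.find s pat = -1) :
    pyPartition s pat = (s, [], []) := by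
  rw [PySem.Chars.find_eq_neg_one_iff] at h
  induction s with
  | nil =>
    rw [pyPartition]
    rw [if_neg (by intro hp; exact h ((List.isPrefixOf_iff_prefix.mp hp).isInfix))]
  | cons c t ih =>
    rw [pyPartition]
    rw [if_neg (by intro hp; exact h ((List.isPrefixOf_iff_prefix.mp hp).isInfix))]
    have ht : ¬ pat <:+: t := fun hi => h (infix_cons_of_infix c hi)
    simp [ih ht]

theorem pyPartition_found {s pat : List Char} (h : 0 ≤ PySem.Chars.find s pat) :
    pyPartition s pat =
      (s.take (PySem.Chars.find s pat).toNat, pat,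
        s.drop ((PySem.Chars.find s pat).toNat + pat.length)) := by
  induction s with
  | nil =>
    obtain ⟨hpre, _⟩ := PySem.Chars.find_spec h
    simp only [List.drop_nil] at hpre
    have hpat : pat = [] := List.prefix_nil.mp hpre
    subst hpat
    simp [pyPartition, PySem.Chars.find_nil]
  | cons c t ih =>
    obtain ⟨hpre, hmin⟩ := PySem.Chars.find_spec h
    by_cases hp : pat <+: c :: t
    · have hf0 : PySem.Chars.find (c :: t) pat = 0 := by
        by_contra hne
        exact hmin 0 (by omega) (by simpa)
      rw [pyPartition, if_pos (List.isPrefixOf_iff_prefix.mpr hp), hf0]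
      simp
    · rw [find_cons hp] at h ⊢
      have h1 : PySem.Chars.find t pat ≠ -1 := by
        intro he; rw [if_pos he] at h; omega
      rw [if_neg h1] at h ⊢
      have h0 : 0 ≤ PySem.Chars.find t pat := by
        have := PySem.Chars.neg_one_le_find t pat; omega
      rw [pyPartition, if_neg (fun hp' => hp (List.isPrefixOf_iff_prefix.mp hp'))]
      simp only [ih h0]
      have : (PySem.Chars.find t pat + 1).toNat = (PySem.Chars.find t pat).toNat + 1 := by omega
      simp only [this, List.take_succ_cons]
      rw [show (PySem.Chars.find t pat).toNat + 1 + pat.length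
            = ((PySem.Chars.find t pat).toNat + pat.length) + 1 from by omega,
        List.drop_succ_cons]

-- '</span>' cannot start on the 's','p','a','n' of a '<span': searching from start+1
-- finds the same occurrence as searching after the whole '<span' tag, shifted by 4.
theorem find_span_tail (u : List Char) :
    PySem.Chars.find ('s' :: 'p' :: 'a' :: 'n' :: u) "</span>".toList =
      if PySem.Chars.find u "</span>".toList = -1 then -1
      else PySem.Chars.find u "</span>".toList + 4 := by
  have hlt : ∀ (c : Char) (w : List Char), c ≠ '<' → ¬ "</span>".toList <+: c :: w := by
    intro c w hc hp
    exact hc ((List.cons_prefix_cons.mp hp).1.symm)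
  rw [find_cons (hlt _ _ (by decide)), find_cons (hlt _ _ (by decide)),
      find_cons (hlt _ _ (by decide)), find_cons (hlt _ _ (by decide))]
  set v := PySem.Chars.find u "</span>".toList with hv
  by_cases h : v = -1
  · simp [h]
  · have h0 : 0 ≤ v := by
      have := PySem.Chars.neg_one_le_find u "</span>".toList
      rw [← hv] at this; omega
    rw [if_neg h, if_neg (show ¬(v + 1 = -1) from by omega),
        if_neg (show ¬(v + 1 + 1 = -1) from by omega),
        if_neg (show ¬(v + 1 + 1 + 1 = -1) from by omega), if_neg h]
    omega

theorem go_eq : ∀ (fuel : Nat) (data : String),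
    cleanSpanLabelGoA fuel data = String.ofList (cleanSpanLabelGoB fuel data.toList) := by
  intro fuel
  induction fuel with
  | zero => intro data; simp [cleanSpanLabelGoA, cleanSpanLabelGoB]
  | succ n ih =>
    intro data
    simp only [cleanSpanLabelGoA, cleanSpanLabelGoB, PySem.Str.find_eq, PySem.Str.len_eq,
      PySem.Str.toList_slice, PySem.Chars.slice_eq_listSlice]
    set s := data.toList with hs
    set st : Int := PySem.Chars.find s "<span".toList with hstdef
    by_cases h : st = -1
    · rw [if_pos h, pyPartition_not_found (hstdef ▸ h)]
      simp [hs]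
    · rw [if_neg h]
      have h0 : (0 : Int) ≤ st := by
        have h1 := PySem.Chars.neg_one_le_find s "<span".toList
        rw [← hstdef] at h1; omega
      rw [pyPartition_found (hstdef ▸ h0)]
      rw [← hstdef]
      rw [if_neg (by decide : ("<span".toList.isEmpty = true) → False)]
      obtain ⟨hpre, _⟩ := PySem.Chars.find_spec (hstdef ▸ h0)
      rw [← hstdef] at hpre
      -- d := s.drop st.toNat = "<span" ++ u with u = s.drop (st.toNat + 5)
      set u : List Char := s.drop (st.toNat + 5) with hu
      have hd : s.drop st.toNat = "<span".toList ++ u := by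
        obtain ⟨w, hw⟩ := hpre
        have hwu : w = u := by
          have hw5 : w = (s.drop st.toNat).drop 5 := by rw [← hw]; simp
          rw [hw5, List.drop_drop, hu]
        rw [← hw, hwu]
      have hrest : s.drop ((st.toNat) + "<span".toList.length) = u := by
        simp [hu]
      rw [hrest]
      -- A's inner find over s[start+1:] equals the shifted find over u
      have hk : st + 1 = ((st.toNat + 1 : Nat) : Int) := by omega
      have hdrop1 : PySem.List.slice s (some (st + 1)) (some (s.length : Int))
          = s.drop (st.toNat + 1) := by
        rw [hk, PySem.List.slice_natCast]
        exact List.take_of_length_le (by simp)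
      have hd1 : s.drop (st.toNat + 1) = 's' :: 'p' :: 'a' :: 'n' :: u := by
        rw [← List.drop_drop, hd]
        simp
      rw [hdrop1, hd1, find_span_tail]
      set rel : Int := PySem.Chars.find u "</span>".toList with hreldef
      by_cases hrel : rel = -1
      · rw [if_pos hrel, if_pos (by simp), pyPartition_not_found (hreldef ▸ hrel)]
        simp [hs]
      · have hrel0 : (0 : Int) ≤ rel := by
          have := PySem.Chars.neg_one_le_find u "</span>".toList
          rw [← hreldef] at this; omega
        rw [if_neg hrel, if_neg (by omega : ¬ (rel + 4 = -1))]
        rw [pyPartition_found (hreldef ▸ hrel0), ← hreldef]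
        rw [if_neg (by decide : ("</span>".toList.isEmpty = true) → False)]
        obtain ⟨hpre2, _⟩ := PySem.Chars.find_spec (hreldef ▸ hrel0)
        rw [← hreldef] at hpre2
        -- the removed substrings coincide
        have hremove : PySem.List.slice s (some st) (some (rel + 4 + st + 8))
            = "<span".toList ++ u.take rel.toNat ++ "</span>".toList := by
          have hb : rel + 4 + st + 8 = ((st.toNat + (rel.toNat + 12) : Nat) : Int) := by omega
          rw [hb, show st = ((st.toNat : Nat) : Int) by omega, PySem.List.slice_natCast]
          simp only [Int.toNat_natCast]
          rw [show st.toNat + (rel.toNat + 12) - st.toNat = rel.toNat + 12 from by omega, hd]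
          have h5 : ("<span".toList ++ u).take (rel.toNat + 12)
              = "<span".toList ++ u.take (rel.toNat + 7) := by
            rw [show rel.toNat + 12 = 5 + (rel.toNat + 7) from by omega, List.take_add]
            simp
          rw [h5, List.append_assoc]
          congr 1
          rw [show rel.toNat + 7 = rel.toNat + "</span>".toList.length from by simp,
            List.take_add]
          congr 1
          exact (List.prefix_iff_eq_take.mp hpre2).symm
        rw [ih]
        have hstep : (PySem.Str.replace data
              (PySem.Str.slice data (some st) (some (rel + 4 + st + 8))) "").toList
            = PySem.Chars.replace s
                ("<span".toList ++ u.take rel.toNat ++ "</span>".toList) [] := by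
          rw [PySem.Str.toList_replace, PySem.Str.toList_slice,
            PySem.Chars.slice_eq_listSlice, ← hs, hremove]
          rfl
        rw [hstep]

-- ===== VERDICT (by name: the statement is the Claim_ definition above) =====
theorem cleanSpanLabel_spec : Claim_equal_cleanSpanLabel := by
  intro data _
  unfold Spec_cleanSpanLabel cleanSpanLabel cleanSpanLabel_alt
  exact go_eq _ _
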